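-- pv_equiv track=rewrite | github.com/alanbantug/SelectNGenerate | numberSelect.py | loadSelected
-- ===== SOURCE A (Python) =====
-- def loadSelected(selected, numbers, limit):
--
-- 	''' This function will load the numbers into the selected list
-- 	'''
--
-- 	for number in numbers:
--
-- 		if number in selected:
-- 			pass
-- 		else:
--
-- 			if len(selected) < limit:
-- 				selected.append(number)
-- 			else:
-- 				break
--
-- 	return selected
-- ===== SOURCE B (Python) =====
-- def loadSelected(selected, numbers, limit):
--     ''' Two-phase: collect the new (unseen) numbers in order, then extend
--         selected with just the prefix that fits under limit. '''
--     seen = set(selected)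
--     new = []
--     for number in numbers:
--         if number not in seen:
--             seen.add(number)
--             new.append(number)
--     need = limit - len(selected)
--     if need > 0:
--         selected.extend(new[:need])
--     return selected
-- ===== Notes on version B (the rewrite author's own statement) =====
-- stated objective: simpler
-- what changed: Replaces A's interleaved membership-test/append/break loop (with O(n*m) list scans) with a two-phase shape: build the ordered list of unseen numbers once using a set, then extend selected by its prefix of length limit-len(selected).
import Mathlib
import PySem

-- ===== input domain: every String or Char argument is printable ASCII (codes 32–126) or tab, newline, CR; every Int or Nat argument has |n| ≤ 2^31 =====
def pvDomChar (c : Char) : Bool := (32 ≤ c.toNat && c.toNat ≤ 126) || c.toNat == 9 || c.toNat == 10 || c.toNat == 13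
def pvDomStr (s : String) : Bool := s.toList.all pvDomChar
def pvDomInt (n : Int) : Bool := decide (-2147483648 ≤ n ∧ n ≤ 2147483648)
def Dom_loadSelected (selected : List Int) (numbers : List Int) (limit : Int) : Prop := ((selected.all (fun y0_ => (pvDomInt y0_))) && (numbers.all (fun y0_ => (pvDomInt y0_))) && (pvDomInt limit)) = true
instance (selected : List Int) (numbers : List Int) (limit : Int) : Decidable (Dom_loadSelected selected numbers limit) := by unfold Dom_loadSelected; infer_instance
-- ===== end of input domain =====

-- B replaces A's interleaved test/append/break loop by a two-phase "collect unseen, then take the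
-- fitting prefix" shape (objective: simpler). Both Pythons mutate `selected` in place to the same
-- final contents; the equivalence proved here is about the returned list of values.

-- ===== PORT A =====
-- for number in numbers: if in selected skip; elif len(selected) < limit append; else break
def loadSelected (selected : List Int) (numbers : List Int) (limit : Int) : List Int :=
  match numbers with
  | [] => selected
  | n :: ns =>
    if n ∈ selected then loadSelected selected ns limit
    else if (selected.length : Int) < limit then loadSelected (selected ++ [n]) ns limit
    else selected

-- ===== PORT B =====
-- the loop building `new`: elements of numbers not in `seen`, threading seen.add
def pvCollectNew (seen : PySem.Set Int) (numbers : List Int) : List Int :=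
  match numbers with
  | [] => []
  | n :: ns =>
    if n ∈ seen then pvCollectNew seen ns
    else n :: pvCollectNew (PySem.Set.add seen n) ns

def loadSelected_alt (selected : List Int) (numbers : List Int) (limit : Int) : List Int :=
  let new := pvCollectNew (PySem.Set.ofList selected) numbers
  let need := limit - (selected.length : Int)
  if need > 0 then selected ++ new.take need.toNat  -- new[:need] with need > 0
  else selected

-- ===== PRECONDITION & SPEC =====
def Spec_loadSelected (selected : List Int) (numbers : List Int) (limit : Int) (out : List Int) : Prop := out = loadSelected_alt selected numbers limit
instance (selected : List Int) (numbers : List Int) (limit : Int) (out : List Int) : Decidable (Spec_loadSelected selected numbers limit out) := by unfold Spec_loadSelected; infer_instance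

-- ===== CLAIM =====
def Claim_equal_loadSelected : Prop := ∀ (selected : List Int) (numbers : List Int) (limit : Int), Dom_loadSelected selected numbers limit → Spec_loadSelected selected numbers limit (loadSelected selected numbers limit)

-- ===== LEMMAS AND PROOFS =====
-- Invariant: if the membership of `seen` matches that of `selected`, A's loop equals
-- "append the fitting prefix of the collected new elements".
theorem pv_main (numbers : List Int) (selected : List Int) (limit : Int)
    (seen : PySem.Set Int) (hs : ∀ x : Int, x ∈ seen ↔ x ∈ selected) :
    loadSelected selected numbers limit =
      if (selected.length : Int) < limit then
        selected ++ (pvCollectNew seen numbers).take (limit - selected.length).toNat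
      else selected := by
  induction numbers generalizing selected seen with
  | nil => simp [loadSelected, pvCollectNew]
  | cons n ns ih =>
    by_cases hmem : n ∈ selected
    · have hseen : n ∈ seen := (hs n).mpr hmem
      rw [show loadSelected selected (n :: ns) limit = loadSelected selected ns limit by
            simp [loadSelected, hmem]]
      rw [show pvCollectNew seen (n :: ns) = pvCollectNew seen ns by
            simp [pvCollectNew, hseen]]
      exact ih selected seen hs
    · have hseen : n ∉ seen := fun h => hmem ((hs n).mp h)
      by_cases hlt : (selected.length : Int) < limit
      · rw [show loadSelected selected (n :: ns) limit
              = loadSelected (selected ++ [n]) ns limit by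
            simp [loadSelected, hmem, hlt]]
        have hs' : ∀ x : Int, x ∈ PySem.Set.add seen n ↔ x ∈ selected ++ [n] := by
          intro x
          simp [PySem.Set.mem_add, hs x, or_comm]
        rw [ih (selected ++ [n]) (PySem.Set.add seen n) hs']
        rw [show pvCollectNew seen (n :: ns)
              = n :: pvCollectNew (PySem.Set.add seen n) ns by
            simp [pvCollectNew, hseen]]
        have hk : (limit - selected.length).toNat
            = ((limit - (selected ++ [n]).length).toNat) + 1 := by
          simp only [List.length_append, List.length_cons, List.length_nil]
          omega
        by_cases hlt' : ((selected ++ [n]).length : Int) < limit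
        · simp only [hlt', if_pos, hlt, hk, List.take_succ_cons, List.append_assoc,
            List.singleton_append]
        · have hz : (limit - (selected ++ [n]).length).toNat = 0 := by
            simp only [List.length_append, List.length_cons, List.length_nil] at hlt' ⊢
            omega
          simp only [hlt', if_neg, not_false_iff, hlt, if_pos, hk, hz, List.take_succ_cons,
            List.take_zero, List.append_nil]
        -- reduce leftover ite on hlt
      · rw [show loadSelected selected (n :: ns) limit = selected by
            simp [loadSelected, hmem, hlt]]
        simp [hlt]

theorem pv_mem_ofList (selected : List Int) :
    ∀ x : Int, x ∈ PySem.Set.ofList selected ↔ x ∈ selected := by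
  intro x; simp [PySem.Set.mem_ofList]

-- ===== VERDICT =====
theorem loadSelected_spec : Claim_equal_loadSelected := by
  intro selected numbers limit _
  unfold Spec_loadSelected loadSelected_alt
  rw [pv_main numbers selected limit _ (pv_mem_ofList selected)]
  by_cases h : (selected.length : Int) < limit
  · simp [h]
  · simp [h]
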